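-- pv_equiv track=rewrite | github.com/m-petersen/lacuna | src/lacuna/io/bids.py | _parse_bids_filename
-- ===== SOURCE A (Python) =====
-- def _parse_bids_filename(filename: str) -> dict[str, str]:
--     """
--     Parse BIDS entities from a filename.
--
--     Parameters
--     ----------
--     filename : str
--         BIDS filename (e.g., sub-001_ses-01_label-lesion_atlas-X_parcelstats.tsv)
--
--     Returns
--     -------
--     dict[str, str]
--         Dictionary of entity key-value pairs.
--     """
--     entities = {}
--
--     # Remove extension
--     name = filename
--     for ext in [".tsv", ".json", ".nii.gz", ".nii"]:
--         if name.endswith(ext):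
--             name = name[: -len(ext)]
--             break
--
--     # Parse key-value pairs
--     parts = name.split("_")
--     for part in parts:
--         if "-" in part:
--             key, value = part.split("-", 1)
--             entities[key] = value
--
--     return entities
-- ===== SOURCE B (Python) =====
-- def _parse_bids_filename(filename: str) -> dict[str, str]:
--     """Single character-level scan: strip a known extension, then walk the name
--     once with a small state machine (key buffer / value buffer) instead of
--     splitting into parts and re-splitting each part."""
--     name = next(
--         (filename[: -len(ext)]
--          for ext in (".tsv", ".json", ".nii.gz", ".nii")
--          if filename.endswith(ext)),
--         filename,
--     )
--
--     entities = {}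
--     key, value, in_value = "", "", False
--     for ch in name:
--         if ch == "_":
--             if in_value:
--                 entities[key] = value
--             key, value, in_value = "", "", False
--         elif ch == "-" and not in_value:
--             in_value = True
--         elif in_value:
--             value += ch
--         else:
--             key += ch
--     if in_value:
--         entities[key] = value
--     return entities
-- ===== Notes on version B (the rewrite author's own statement) =====
-- stated objective: alternative
-- what changed: Replaces the split-into-parts pass (split on underscore, then a maxsplit-1 split of each part on hyphen) with a single character-level state-machine scan that accumulates key/value buffers and flushes an entry at each separator or at end of string; extension stripping becomes a next() over a generator.
import Mathlib
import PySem

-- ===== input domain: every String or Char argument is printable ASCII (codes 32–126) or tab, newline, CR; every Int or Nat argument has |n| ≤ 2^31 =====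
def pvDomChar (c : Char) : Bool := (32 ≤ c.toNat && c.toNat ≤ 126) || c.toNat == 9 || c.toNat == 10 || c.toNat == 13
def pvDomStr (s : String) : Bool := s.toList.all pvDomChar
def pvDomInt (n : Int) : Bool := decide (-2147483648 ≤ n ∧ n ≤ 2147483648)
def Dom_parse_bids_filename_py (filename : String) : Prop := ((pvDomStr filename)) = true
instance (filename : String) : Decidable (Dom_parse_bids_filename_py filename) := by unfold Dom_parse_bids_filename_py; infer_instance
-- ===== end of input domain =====

-- B replaces the split-into-parts parsing of A with a single character-level state-machine scan (alternative decomposition, same cost).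


-- ===== PORT A =====
-- the extensions list, as List Char
def pvExts : List (List Char) := [".tsv".toList, ".json".toList, ".nii.gz".toList, ".nii".toList]

-- 'for ext in [...]: if name.endswith(ext): name = name[:-len(ext)]; break'
def stripExtA (name : List Char) : List (List Char) → List Char
  | [] => name
  | e :: rest =>
    if PySem.Chars.endswith name e then PySem.Chars.slice name none (some (-(e.length : Int)))
    else stripExtA name rest

-- body of the 'for part in parts' loop: if "-" in part: key, value = part.split("-", 1); entities[key] = value
def stepA (d : PySem.Dict (List Char) (List Char)) (part : List Char) : PySem.Dict (List Char) (List Char) :=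
  if PySem.Chars.isIn ['-'] part then
    match PySem.Chars.splitOnMax part ['-'] 1 with
    | k :: v :: _ => d.insert k v
    | _ => d      -- unreachable: split("-",1) with "-" present yields two pieces
  else d

def parse_bids_filename_py (filename : String) : List (String × String) :=
  let name := stripExtA filename.toList pvExts
  let parts := PySem.Chars.splitOn name ['_']
  let entities := parts.foldl stepA PySem.Dict.empty
  entities.items.map (fun p => (String.mk p.1, String.mk p.2))

-- ===== PORT B =====
-- B's tuple of extensions
def pvExtsB : List (List Char) := [".tsv".toList, ".json".toList, ".nii.gz".toList, ".nii".toList]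

-- name = next((filename[:-len(ext)] for ext in EXTS if filename.endswith(ext)), filename)
def stripExtB (name : List Char) : List Char :=
  match pvExtsB.find? (fun e => PySem.Chars.endswith name e) with
  | some e => PySem.Chars.slice name none (some (-(e.length : Int)))
  | none => name

-- the character state machine: key buffer, value buffer, in_value flag
def scanB (d : PySem.Dict (List Char) (List Char)) (key val : List Char) (inVal : Bool) :
    List Char → PySem.Dict (List Char) (List Char)
  | [] => if inVal then d.insert key val else d
  | c :: cs =>
    if c = '_' then scanB (if inVal then d.insert key val else d) [] [] false cs
    else if c = '-' ∧ ¬ inVal then scanB d key val true cs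
    else if inVal then scanB d key (val ++ [c]) inVal cs
    else scanB d (key ++ [c]) val inVal cs

def parse_bids_filename_py_alt (filename : String) : List (String × String) :=
  let name := stripExtB filename.toList
  let entities := scanB PySem.Dict.empty [] [] false name
  entities.items.map (fun p => (String.mk p.1, String.mk p.2))

-- ===== PRECONDITION & SPEC =====
def Spec_parse_bids_filename_py (filename : String) (out : List (String × String)) : Prop := out = parse_bids_filename_py_alt filename
instance (filename : String) (out : List (String × String)) : Decidable (Spec_parse_bids_filename_py filename out) := by unfold Spec_parse_bids_filename_py; infer_instance

-- ===== CLAIM (what is proved, stated in full; the proofs are below) =====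
def Claim_equal_parse_bids_filename_py : Prop := ∀ (filename : String), Dom_parse_bids_filename_py filename → Spec_parse_bids_filename_py filename (parse_bids_filename_py filename)

-- ===== LEMMAS AND PROOFS =====

-- reference split of a list at a separator character
def segSplit (sep : Char) : List Char → List (List Char)
  | [] => [[]]
  | a :: rest =>
    if a = sep then [] :: segSplit sep rest
    else
      match segSplit sep rest with
      | s :: ss => (a :: s) :: ss
      | [] => [[a]]   -- unreachable

-- prepend a prefix onto the first segment
def consHead (pre : List Char) : List (List Char) → List (List Char)
  | [] => [pre]
  | s :: ss => (pre ++ s) :: ss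

-- reference per-segment step
def refStep (d : PySem.Dict (List Char) (List Char)) (part : List Char) : PySem.Dict (List Char) (List Char) :=
  if '-' ∈ part then d.insert (part.takeWhile (· ≠ '-')) (part.dropWhile (· ≠ '-')).tail else d

theorem segSplit_ne_nil (sep : Char) (l : List Char) : segSplit sep l ≠ [] := by
  cases l with
  | nil => simp [segSplit]
  | cons a rest =>
    simp only [segSplit]
    split
    · simp
    · split <;> simp_all

theorem splitOn_go_eq (l : List Char) : ∀ (fuel : Nat) (cur : List Char) (acc : List (List Char)),
    l.length < fuel →
    PySem.Chars.splitOn.go ['_'] fuel l cur acc = acc.reverse ++ consHead cur.reverse (segSplit '_' l) := by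
  induction l with
  | nil =>
    intro fuel cur acc h
    cases fuel with
    | zero => omega
    | succ f => simp [PySem.Chars.splitOn.go, segSplit, consHead]
  | cons c rest ih =>
    intro fuel cur acc h
    cases fuel with
    | zero => omega
    | succ f =>
      by_cases hc : c = '_'
      · subst hc
        rw [show PySem.Chars.splitOn.go ['_'] (f+1) ('_' :: rest) cur acc
              = PySem.Chars.splitOn.go ['_'] f rest [] (cur.reverse :: acc) by
            simp [PySem.Chars.splitOn.go, List.isPrefixOf]]
        rw [ih f [] (cur.reverse :: acc) (by simp at h; omega)]
        simp [segSplit, consHead]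
        cases hs : segSplit '_' rest with
        | nil => exact absurd hs (segSplit_ne_nil _ _)
        | cons s ss => simp [consHead]
      · rw [show PySem.Chars.splitOn.go ['_'] (f+1) (c :: rest) cur acc
              = PySem.Chars.splitOn.go ['_'] f rest (c :: cur) acc by
            simp [PySem.Chars.splitOn.go, List.isPrefixOf]
            intro h; exact absurd h.symm hc]
        rw [ih f (c :: cur) acc (by simp at h; omega)]
        simp only [segSplit, if_neg hc]
        cases hs : segSplit '_' rest with
        | nil => exact absurd hs (segSplit_ne_nil _ _)
        | cons s ss => simp [consHead]

theorem splitOn_eq_segSplit (l : List Char) :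
    PySem.Chars.splitOn l ['_'] = segSplit '_' l := by
  rw [PySem.Chars.splitOn, splitOn_go_eq l (l.length + 1) [] [] (by omega)]
  cases hs : segSplit '_' l with
  | nil => exact absurd hs (segSplit_ne_nil _ _)
  | cons s ss => simp [consHead]

-- splitOnMax with max 0: the remainder is returned wholesale
theorem splitOnMax_go_zero (suf : List Char) (fuel : Nat) (acc : List (List Char)) :
    PySem.Chars.splitOnMax.go ['-'] fuel 0 suf [] acc = acc.reverse ++ [suf] := by
  cases fuel with
  | zero => simp [PySem.Chars.splitOnMax.go]
  | succ f => cases suf <;> simp [PySem.Chars.splitOnMax.go]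

theorem splitOnMax_go_one (pre : List Char) : ∀ (suf cur : List Char) (fuel : Nat) (acc : List (List Char)),
    '-' ∉ pre → (pre ++ '-' :: suf).length < fuel →
    PySem.Chars.splitOnMax.go ['-'] fuel 1 (pre ++ '-' :: suf) cur acc
      = acc.reverse ++ [cur.reverse ++ pre, suf] := by
  induction pre with
  | nil =>
    intro suf cur fuel acc _ h
    cases fuel with
    | zero => simp at h
    | succ f =>
      rw [show PySem.Chars.splitOnMax.go ['-'] (f+1) 1 ([] ++ '-' :: suf) cur acc
            = PySem.Chars.splitOnMax.go ['-'] f 0 suf [] (cur.reverse :: acc) by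
          simp [PySem.Chars.splitOnMax.go, List.isPrefixOf]]
      rw [splitOnMax_go_zero]
      simp
  | cons c pre' ih =>
    intro suf cur fuel acc hp h
    cases fuel with
    | zero => simp at h
    | succ f =>
      have hc : c ≠ '-' := by intro hc; exact hp (by simp [hc])
      rw [show PySem.Chars.splitOnMax.go ['-'] (f+1) 1 ((c :: pre') ++ '-' :: suf) cur acc
            = PySem.Chars.splitOnMax.go ['-'] f 1 (pre' ++ '-' :: suf) (c :: cur) acc by
          simp [PySem.Chars.splitOnMax.go, List.isPrefixOf]
          intro h; exact absurd h.symm hc]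
      rw [ih suf (c :: cur) f acc (fun hm => hp (List.mem_cons_of_mem _ hm)) (by simp at h ⊢; omega)]
      simp

theorem splitOnMax_one_eq (part : List Char) (h : '-' ∈ part) :
    PySem.Chars.splitOnMax part ['-'] 1
      = [part.takeWhile (· ≠ '-'), (part.dropWhile (· ≠ '-')).tail] := by
  have hd : part.dropWhile (· ≠ '-') ≠ [] := by
    intro hnil
    have := List.dropWhile_eq_nil_iff.mp hnil '-' h
    simp at this
  obtain ⟨c, suf, hds0⟩ := List.exists_cons_of_ne_nil hd
  have hc : c = '-' := by
    have h1 : (part.dropWhile (· ≠ '-')).head? = some c := by rw [hds0]; rfl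
    have h2 := List.head_dropWhile_not (p := (· ≠ '-')) (l := part) hd
    rw [List.head?_eq_head hd] at h1
    simp only [Option.some.injEq] at h1
    rw [← h1]
    simpa using h2
  subst hc
  have htail : (part.dropWhile (· ≠ '-')).tail = suf := by rw [hds0, List.tail_cons]
  have hsplit : part = part.takeWhile (· ≠ '-') ++ '-' :: suf := by
    conv_lhs => rw [← List.takeWhile_append_dropWhile (p := (· ≠ '-')) (l := part)]
    rw [hds0]
  have hnp : '-' ∉ part.takeWhile (· ≠ '-') := by
    intro hm
    have := List.mem_takeWhile_imp hm
    simp at this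
  rw [htail, PySem.Chars.splitOnMax, if_neg (by norm_num)]
  simp only [Int.toNat_one]
  conv_lhs => rw [hsplit]
  rw [splitOnMax_go_one _ suf [] _ [] hnp (Nat.lt_succ_self _)]
  simp

theorem isIn_dash (part : List Char) : PySem.Chars.isIn ['-'] part = true ↔ '-' ∈ part := by
  rw [PySem.Chars.isIn_iff_infix]
  constructor
  · intro hinf; exact hinf.mem (by simp)
  · intro hm
    obtain ⟨pre, suf, hps⟩ := List.mem_iff_append.mp hm
    exact ⟨pre, suf, by simp [hps]⟩

theorem stepA_eq_refStep (d : PySem.Dict (List Char) (List Char)) (part : List Char) :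
    stepA d part = refStep d part := by
  unfold stepA refStep
  by_cases h : '-' ∈ part
  · rw [if_pos ((isIn_dash part).mpr h), if_pos h, splitOnMax_one_eq part h]
  · rw [if_neg (by simp [isIn_dash part, h]), if_neg h]

theorem takeWhile_no (key : List Char) (h : '-' ∉ key) : key.takeWhile (· ≠ '-') = key := by
  rw [List.takeWhile_eq_self_iff]
  intro c hc
  simp only [decide_eq_true_eq]
  intro hceq; exact h (hceq ▸ hc)

theorem takeWhile_append_no (key s : List Char) (h : '-' ∉ key) :
    (key ++ s).takeWhile (· ≠ '-') = key ++ s.takeWhile (· ≠ '-') := by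
  rw [List.takeWhile_append, takeWhile_no key h, if_pos rfl]

theorem dropWhile_append_no (key s : List Char) (h : '-' ∉ key) :
    (key ++ s).dropWhile (· ≠ '-') = s.dropWhile (· ≠ '-') := by
  induction key with
  | nil => simp
  | cons c k ih =>
    simp only [List.cons_append, List.dropWhile_cons]
    rw [if_pos (by simp; intro hc; exact h (by simp [hc]))]
    exact ih (fun hm => h (List.mem_cons_of_mem _ hm))

-- the combined invariant for the two scan modes
theorem scan_eq (cs : List Char) :
    (∀ (d : PySem.Dict (List Char) (List Char)) (key : List Char),
        '-' ∉ key → '_' ∉ key →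
        scanB d key [] false cs = (consHead key (segSplit '_' cs)).foldl refStep d)
    ∧ (∀ (d : PySem.Dict (List Char) (List Char)) (key val : List Char),
        scanB d key val true cs
          = ((segSplit '_' cs).tail).foldl refStep
              (d.insert key (val ++ (segSplit '_' cs).headI))) := by
  induction cs with
  | nil =>
    constructor
    · intro d key h1 _
      simp [scanB, segSplit, consHead, refStep, h1]
    · intro d key val
      simp [scanB, segSplit]
  | cons c rest ih =>
    obtain ⟨ihF, ihT⟩ := ih
    constructor
    · intro d key h1 h2
      by_cases hc : c = '_'
      · subst hc
        rw [show scanB d key [] false ('_' :: rest) = scanB d [] [] false rest by simp [scanB]]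
        rw [ihF d [] (by simp) (by simp)]
        simp only [segSplit, if_pos rfl]
        cases hs : segSplit '_' rest with
        | nil => exact absurd hs (segSplit_ne_nil _ _)
        | cons s ss =>
          simp [consHead, List.foldl_cons, refStep, h1]
      · by_cases hd : c = '-'
        · subst hd
          rw [show scanB d key [] false ('-' :: rest) = scanB d key [] true rest by
            simp [scanB]]
          rw [ihT d key []]
          simp only [segSplit, if_neg hc]
          cases hs : segSplit '_' rest with
          | nil => exact absurd hs (segSplit_ne_nil _ _)
          | cons s ss =>
            simp only [consHead, List.foldl_cons, List.tail_cons, List.headI, List.nil_append]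
            congr 1
            rw [refStep, if_pos (by simp)]
            rw [takeWhile_append_no key ('-' :: s) h1, dropWhile_append_no key ('-' :: s) h1]
            simp [List.takeWhile_cons, List.dropWhile_cons]
        · rw [show scanB d key [] false (c :: rest) = scanB d (key ++ [c]) [] false rest by
            simp [scanB, hc, hd]]
          rw [ihF d (key ++ [c]) (by simp [h1]; exact fun h => hd h.symm)
                (by simp [h2]; exact fun h => hc h.symm)]
          simp only [segSplit, if_neg hc]
          cases hs : segSplit '_' rest with
          | nil => exact absurd hs (segSplit_ne_nil _ _)
          | cons s ss => simp [consHead]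
    · intro d key val
      by_cases hc : c = '_'
      · subst hc
        rw [show scanB d key val true ('_' :: rest) = scanB (d.insert key val) [] [] false rest by
          simp [scanB]]
        rw [ihF (d.insert key val) [] (by simp) (by simp)]
        simp only [segSplit, if_pos rfl]
        cases hs : segSplit '_' rest with
        | nil => exact absurd hs (segSplit_ne_nil _ _)
        | cons s ss => simp [consHead]
      · rw [show scanB d key val true (c :: rest) = scanB d key (val ++ [c]) true rest by
          simp [scanB, hc]]
        rw [ihT d key (val ++ [c])]
        simp only [segSplit, if_neg hc]
        cases hs : segSplit '_' rest with
        | nil => exact absurd hs (segSplit_ne_nil _ _)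
        | cons s ss => simp

theorem stripExt_eq (name : List Char) : stripExtB name = stripExtA name pvExts := by
  unfold stripExtB pvExtsB pvExts
  by_cases h1 : PySem.Chars.endswith name ['.','t','s','v'] <;>
  by_cases h2 : PySem.Chars.endswith name ['.','j','s','o','n'] <;>
  by_cases h3 : PySem.Chars.endswith name ['.','n','i','i','.','g','z'] <;>
  by_cases h4 : PySem.Chars.endswith name ['.','n','i','i'] <;>
  simp [stripExtA, List.find?, h1, h2, h3, h4]

theorem dict_eq (name : List Char) :
    (PySem.Chars.splitOn name ['_']).foldl stepA PySem.Dict.empty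
      = scanB PySem.Dict.empty [] [] false name := by
  rw [splitOn_eq_segSplit]
  rw [(scan_eq name).1 PySem.Dict.empty [] (by simp) (by simp)]
  have hch : consHead [] (segSplit '_' name) = segSplit '_' name := by
    cases hs : segSplit '_' name with
    | nil => exact absurd hs (segSplit_ne_nil _ _)
    | cons s ss => simp [consHead]
  rw [hch]
  have hfun : stepA = refStep := funext fun d => funext fun part => stepA_eq_refStep d part
  rw [hfun]

-- ===== VERDICT (by name: the statement is the Claim_ definition above) =====
theorem parse_bids_filename_py_spec : Claim_equal_parse_bids_filename_py := by
  intro filename _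
  unfold Spec_parse_bids_filename_py
  dsimp only [parse_bids_filename_py, parse_bids_filename_py_alt]
  rw [stripExt_eq, dict_eq]
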